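-- pv_equiv track=rewrite | github.com/Algorithm-bbackgongdan/Almut-3rd | code/seungwookim99/week3/prog_64062.py | solution
-- ===== SOURCE A (Python) =====
-- def canPass(num, stones, k):
--     count = 0
--     for i in range(len(stones)):
--         if stones[i] < num:
--             count += 1
--         else:
--             count = 0
--         if count == k:
--             return False
--     return True
--
-- def solution(stones, k):
--     answer = 0
--     right, left = max(stones), min(stones)
--     while left <= right:
--         mid = (left + right) // 2
--         if canPass(mid, stones, k):
--             answer = max(answer, mid)
--             left = mid + 1
--         else:
--             right = mid - 1
--     return answer
-- ===== SOURCE B (Python) =====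
-- def solution(stones, k):
--     n = len(stones)
--     if k > n:
--         return max(max(stones), 0)
--     best = max(stones[0:k])
--     for i in range(1, n - k + 1):
--         m = max(stones[i:i+k])
--         if m < best:
--             best = m
--     return max(best, 0)
-- ===== Notes on version B (the rewrite author's own statement) =====
-- stated objective: simpler
-- what changed: A binary-searches the answer value, re-scanning all stones with a run-counter for each candidate; B computes the result directly as the minimum over all k-windows of the window maximum (floored at 0 as A's answer=0 initialisation does), with no search over values.
-- outside the precondition, e.g. on solution([5], 0): A returns 0, B raises ValueError; on solution([5], -1): A returns 5, B raises ValueError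
import Mathlib
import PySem

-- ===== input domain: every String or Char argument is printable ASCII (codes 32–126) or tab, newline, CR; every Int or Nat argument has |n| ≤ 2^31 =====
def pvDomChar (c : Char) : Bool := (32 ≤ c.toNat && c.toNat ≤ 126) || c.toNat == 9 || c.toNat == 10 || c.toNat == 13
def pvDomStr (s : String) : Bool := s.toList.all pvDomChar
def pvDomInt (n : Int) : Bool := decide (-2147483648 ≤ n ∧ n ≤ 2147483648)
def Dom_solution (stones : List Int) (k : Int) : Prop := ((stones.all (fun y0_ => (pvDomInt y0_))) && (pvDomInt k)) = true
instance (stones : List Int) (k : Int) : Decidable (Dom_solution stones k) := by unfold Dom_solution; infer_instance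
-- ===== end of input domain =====

-- B replaces A's binary search over answer values by a direct minimum over the k-window maxima (simpler, no value search); proved equal on nonempty stones with k ≥ 1.

-- ===== PORT A =====
-- canPass's 'for i in range(len(stones))' loop with its running count (early 'return False' = result false)
def canPassAux (num k : Int) : List Int → Int → Bool
  | [], _ => true
  | s :: rest, count =>
    let c := if s < num then count + 1 else 0
    if c = k then false else canPassAux num k rest c

def canPass (num : Int) (stones : List Int) (k : Int) : Bool :=
  canPassAux num k stones 0

-- the 'while left <= right' binary-search loop of solution; the fuel argument only bounds
-- the number of iterations (the interval length shrinks each turn, so right+1-left turns always suffice)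
def solveLoop (stones : List Int) (k : Int) : Nat → Int → Int → Int → Int
  | 0, answer, _, _ => answer
  | fuel + 1, answer, left, right =>
    if left ≤ right then
      let mid := PySem.Int.floordiv (left + right) 2
      if canPass mid stones k then
        solveLoop stones k fuel (max answer mid) (mid + 1) right
      else
        solveLoop stones k fuel answer left (mid - 1)
    else answer

def solution (stones : List Int) (k : Int) : Int :=
  -- Python's max(stones)/min(stones) raise ValueError on []; that input is outside Pre_solution
  match PySem.List.max? stones (fun y => y), PySem.List.min? stones (fun y => y) with
  | some right, some left => solveLoop stones k (right + 1 - left).toNat 0 left right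
  | _, _ => 0

-- ===== PORT B =====
-- max(stones[i:i+k]); the slice is nonempty for every i B uses inside Pre_, so .getD 0 is never taken
def winMax (stones : List Int) (i k : Int) : Int :=
  (PySem.List.max? (PySem.List.slice stones (some i) (some (i + k))) (fun y => y)).getD 0

-- the 'for i in range(1, n - k + 1)' loop, starting from best = max(stones[0:k])
def bestFold (stones : List Int) (k n : Int) : Int :=
  (PySem.List.pyRange 1 (n - k + 1) 1).foldl
    (fun best i => if winMax stones i k < best then winMax stones i k else best)
    (winMax stones 0 k)

def solution_alt (stones : List Int) (k : Int) : Int :=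
  if k > (stones.length : Int) then
    max ((PySem.List.max? stones (fun y => y)).getD 0) 0
  else
    max (bestFold stones k (stones.length : Int)) 0

-- ===== PRECONDITION & SPEC =====
-- Pre_ excludes empty stones (A's max() raises ValueError) and non-positive k (outside the problem's
-- natural domain of positive run lengths; B raises ValueError there on max of an empty slice).
def Pre_solution (stones : List Int) (k : Int) : Prop := stones ≠ [] ∧ 1 ≤ k
instance (stones : List Int) (k : Int) : Decidable (Pre_solution stones k) := by unfold Pre_solution; infer_instance

def pvWitness_solution : List Int × Int := ([2, 4, 5, 3, 2, 1, 4, 2, 5, 1], 3)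

def Spec_solution (stones : List Int) (k : Int) (out : Int) : Prop := out = solution_alt stones k
instance (stones : List Int) (k : Int) (out : Int) : Decidable (Spec_solution stones k out) := by unfold Spec_solution; infer_instance

-- ===== CLAIM (what is proved, stated in full; the proofs are below) =====
def Claim_equal_solution : Prop := ∀ (stones : List Int) (k : Int), Dom_solution stones k → Pre_solution stones k → Spec_solution stones k (solution stones k)

-- ===== LEMMAS AND PROOFS =====

-- a block of ≥ k - c consecutive stones below x kills the scan
theorem canPassAux_bad (x k : Int) :
    ∀ (m q : List Int) (c : Int), 0 ≤ c → c < k → k ≤ c + (m.length : Int) →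
      (∀ s ∈ m, s < x) → canPassAux x k (m ++ q) c = false := by
  intro m
  induction m with
  | nil =>
    intro q c _ h1 h2 _
    exfalso; simp only [List.length_nil, Nat.cast_zero, add_zero] at h2; omega
  | cons s m' ih =>
    intro q c h0 h1 h2 hall
    have hsx : s < x := hall s (by simp)
    simp only [List.cons_append, canPassAux, if_pos hsx]
    by_cases hk : c + 1 = k
    · rw [if_pos hk]
    · rw [if_neg hk]
      refine ih q (c + 1) (by omega) (by omega) ?_ (fun t ht => hall t (by simp [ht]))
      simp only [List.length_cons] at h2; push_cast at h2 ⊢; omega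

-- processing any prefix either fails or reaches the rest with some count 0 ≤ c' < k
theorem canPassAux_prefix_false (x k : Int) :
    ∀ (p rest : List Int) (c : Int), 0 ≤ c → c < k →
      (∀ c', 0 ≤ c' → c' < k → canPassAux x k rest c' = false) →
      canPassAux x k (p ++ rest) c = false := by
  intro p
  induction p with
  | nil => intro rest c h0 h1 h; exact h c h0 h1
  | cons s p' ih =>
    intro rest c h0 h1 h
    simp only [List.cons_append, canPassAux]
    by_cases hsx : s < x
    · simp only [if_pos hsx]
      by_cases hk : c + 1 = k
      · rw [if_pos hk]
      · rw [if_neg hk]; exact ih rest (c + 1) (by omega) (by omega) h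
    · simp only [if_neg hsx]
      have h0k : ¬ ((0 : Int) = k) := by omega
      rw [if_neg h0k]
      exact ih rest 0 le_rfl (by omega) h

theorem canPass_false (x k : Int) (stones p m q : List Int)
    (hsplit : stones = p ++ m ++ q) (hlen : (m.length : Int) = k)
    (hk : 1 ≤ k) (hall : ∀ s ∈ m, s < x) :
    canPass x stones k = false := by
  subst hsplit
  unfold canPass
  rw [List.append_assoc]
  exact canPassAux_prefix_false x k p (m ++ q) 0 le_rfl (by omega)
    (fun c' h0 h1 => canPassAux_bad x k m q c' h0 h1 (by omega) hall)

-- if every k-window of stones contains an element ≥ x, the scan survives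
theorem canPassAux_good (x k : Int) (stones : List Int) (hk : 0 < k)
    (H : ∀ p m q, stones = p ++ m ++ q → (m.length : Int) = k → ∃ s ∈ m, x ≤ s) :
    ∀ (l p w : List Int), stones = p ++ w ++ l → (∀ s ∈ w, s < x) →
      canPassAux x k l (w.length : Int) = true := by
  intro l
  induction l with
  | nil => intro p w _ _; rfl
  | cons s l' ih =>
    intro p w hsp hw
    simp only [canPassAux]
    by_cases hsx : s < x
    · simp only [if_pos hsx]
      have hw' : ∀ t ∈ w ++ [s], t < x := by
        intro t ht
        rcases List.mem_append.1 ht with h | h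
        · exact hw t h
        · simp only [List.mem_singleton] at h; subst h; exact hsx
      have hsp' : stones = p ++ (w ++ [s]) ++ l' := by
        rw [hsp]; simp [List.append_assoc]
      have hne : ¬ ((w.length : Int) + 1 = k) := by
        intro hk2
        obtain ⟨t, htm, htx⟩ := H p (w ++ [s]) l' hsp'
          (by simp only [List.length_append, List.length_cons, List.length_nil]; push_cast; omega)
        have := hw' t htm
        omega
      rw [if_neg hne]
      have hlen : (((w ++ [s]).length : Nat) : Int) = (w.length : Int) + 1 := by
        simp [List.length_append]
      have := ih p (w ++ [s]) hsp' hw'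
      rw [hlen] at this
      exact this
    · simp only [if_neg hsx]
      have h0k : ¬ ((0 : Int) = k) := by omega
      rw [if_neg h0k]
      have := ih (p ++ w ++ [s]) [] (by rw [hsp]; simp) (by simp)
      simpa using this

theorem canPass_true (x k : Int) (stones : List Int) (hk : 0 < k)
    (H : ∀ p m q, stones = p ++ m ++ q → (m.length : Int) = k → ∃ s ∈ m, x ≤ s) :
    canPass x stones k = true := by
  have := canPassAux_good x k stones hk H stones [] [] (by simp) (by simp)
  simpa [canPass] using this

-- characterization of the running-minimum fold B performs
theorem foldl_minif_char (f : Int → Int) :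
    ∀ (L : List Int) (b : Int),
      ((L.foldl (fun best i => if f i < best then f i else best) b) = b ∨
        ∃ i ∈ L, (L.foldl (fun best i => if f i < best then f i else best) b) = f i) ∧
      (L.foldl (fun best i => if f i < best then f i else best) b) ≤ b ∧
      (∀ i ∈ L, (L.foldl (fun best i => if f i < best then f i else best) b) ≤ f i) := by
  intro L
  induction L with
  | nil => intro b; simp
  | cons j L' ih =>
    intro b
    simp only [List.foldl_cons, List.mem_cons]
    by_cases h : f j < b
    · rw [if_pos h]
      obtain ⟨h1, h2, h3⟩ := ih (f j)
      refine ⟨?_, by omega, ?_⟩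
      · rcases h1 with h1 | ⟨i, hi, he⟩
        · exact Or.inr ⟨j, Or.inl rfl, h1⟩
        · exact Or.inr ⟨i, Or.inr hi, he⟩
      · rintro i (rfl | hi)
        · omega
        · exact h3 i hi
    · rw [if_neg h]
      obtain ⟨h1, h2, h3⟩ := ih b
      refine ⟨?_, h2, ?_⟩
      · rcases h1 with h1 | ⟨i, hi, he⟩
        · exact Or.inl h1
        · exact Or.inr ⟨i, Or.inr hi, he⟩
      · rintro i (rfl | hi)
        · omega
        · exact h3 i hi

-- winMax at a valid Nat position is the maximum of the window (stones.drop i).take K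
theorem winMax_window (stones : List Int) (K i : Nat) (k : Int) (hKk : (K : Int) = k)
    (hK : 1 ≤ K) (hik : i + K ≤ stones.length) :
    winMax stones (i : Int) k ∈ (stones.drop i).take K ∧
      ∀ s ∈ (stones.drop i).take K, s ≤ winMax stones (i : Int) k := by
  subst hKk
  unfold winMax
  rw [PySem.List.slice_natCast_add]
  have hlw : ((stones.drop i).take K).length = K := by
    rw [List.length_take, List.length_drop]; omega
  cases hm : PySem.List.max? ((stones.drop i).take K) (fun y => y) with
  | none =>
    exfalso
    have h0 := (PySem.List.max?_eq_none_iff _ _).1 hm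
    rw [h0] at hlw
    simp at hlw; omega
  | some M =>
    refine ⟨by simpa using PySem.List.max?_mem hm, ?_⟩
    intro s hs
    simpa using PySem.List.max?_isMax hm s hs

-- B's pre-clamp value W: a member of stones, a lower bound of every k-window maximum,
-- and itself dominated by one full k-window
theorem alt_char (stones : List Int) (k : Int) (hk1 : 1 ≤ k)
    (hkn : k ≤ (stones.length : Int)) :
    ∃ W, solution_alt stones k = max W 0 ∧ W ∈ stones ∧
      (∀ p m q, stones = p ++ m ++ q → (m.length : Int) = k → ∃ s ∈ m, W ≤ s) ∧
      (∃ p m q, stones = p ++ m ++ q ∧ (m.length : Int) = k ∧ ∀ s ∈ m, s ≤ W) := by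
  have hKk : ((k.toNat : Nat) : Int) = k := Int.toNat_of_nonneg (by omega)
  set K : Nat := k.toNat with hKdef
  set n : Nat := stones.length with hn
  have hK1 : 1 ≤ K := by omega
  have hKn : K ≤ n := by omega
  set L := PySem.List.pyRange 1 ((n : Int) - k + 1) 1 with hL
  set R := L.foldl (fun best i => if winMax stones i k < best then winMax stones i k else best)
      (winMax stones 0 k) with hR
  have halt : solution_alt stones k = max R 0 := by
    unfold solution_alt bestFold
    rw [if_neg (by omega : ¬ k > (stones.length : Int))]
  obtain ⟨hcase, hRb0, hRall⟩ := foldl_minif_char (fun i => winMax stones i k) L (winMax stones 0 k)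
  have hWlb : ∀ i : Nat, i + K ≤ n → R ≤ winMax stones (i : Int) k := by
    intro i hi
    by_cases hi0 : i = 0
    · subst hi0; simpa using hRb0
    · have hmem : ((i : Nat) : Int) ∈ L := by
        rw [hL, PySem.List.mem_pyRange_one]; omega
      exact hRall _ hmem
  have hWex : ∃ i0 : Nat, i0 + K ≤ n ∧ R = winMax stones (i0 : Int) k := by
    rcases hcase with h | ⟨i, hiL, he⟩
    · exact ⟨0, by omega, by simpa using h⟩
    · rw [hL, PySem.List.mem_pyRange_one] at hiL
      refine ⟨i.toNat, by omega, ?_⟩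
      have hcast : ((i.toNat : Nat) : Int) = i := Int.toNat_of_nonneg (by omega)
      rw [hcast]; exact he
  obtain ⟨i0, hi0, hRw⟩ := hWex
  have hwin := winMax_window stones K i0 k hKk hK1 (by omega)
  refine ⟨R, halt, ?_, ?_, ?_⟩
  · rw [hRw]
    exact List.mem_of_mem_drop (List.mem_of_mem_take hwin.1)
  · intro p m q hsp hlen
    have hmK : m.length = K := by omega
    have hwm : (stones.drop p.length).take K = m := by
      rw [hsp, List.append_assoc, List.drop_left, ← hmK, List.take_left]
    have hpk : p.length + K ≤ n := by
      have hlenall := congrArg List.length hsp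
      simp only [List.length_append] at hlenall
      omega
    have hw := winMax_window stones K p.length k hKk hK1 (by omega)
    rw [hwm] at hw
    exact ⟨winMax stones (p.length : Int) k, hw.1, hWlb p.length hpk⟩
  · refine ⟨stones.take i0, (stones.drop i0).take K, (stones.drop i0).drop K, ?_, ?_, ?_⟩
    · rw [List.append_assoc, List.take_append_drop, List.take_append_drop]
    · rw [List.length_take, List.length_drop]
      have : min K (n - i0) = K := by omega
      rw [hn] at this
      rw [this, hKk]
    · intro s hs
      rw [hRw]
      exact hwin.2 s hs

-- the loop computes max ans (min W r) when a threshold W characterizes canPass on [l, r]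
theorem solveLoop_char (stones : List Int) (k W : Int) :
    ∀ (fuel : Nat) (l r ans : Int), (r + 1 - l).toNat ≤ fuel →
      (∀ x, l ≤ x → x ≤ r → (canPass x stones k = true ↔ x ≤ W)) →
      solveLoop stones k fuel ans l r = if l ≤ r ∧ l ≤ W then max ans (min W r) else ans := by
  intro fuel
  induction fuel with
  | zero =>
    intro l r ans hf _
    rw [if_neg (by omega : ¬ (l ≤ r ∧ l ≤ W))]
    rfl
  | succ f ih =>
    intro l r ans hf H
    show (if l ≤ r then _ else ans) = _
    by_cases hlr : l ≤ r
    · rw [if_pos hlr]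
      obtain ⟨hm1, hm2⟩ := PySem.Int.floordiv_two_mid_bounds hlr
      show (if canPass (PySem.Int.floordiv (l + r) 2) stones k then _ else _) = _
      by_cases hcp : canPass (PySem.Int.floordiv (l + r) 2) stones k = true
      · rw [if_pos hcp]
        have hmW : PySem.Int.floordiv (l + r) 2 ≤ W := (H _ hm1 hm2).1 hcp
        rw [ih (PySem.Int.floordiv (l + r) 2 + 1) r (max ans (PySem.Int.floordiv (l + r) 2))
          (by omega) (fun x hx1 hx2 => H x (by omega) hx2)]
        split_ifs <;> omega
      · rw [if_neg hcp]
        have hWmid : W < PySem.Int.floordiv (l + r) 2 := by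
          by_contra hh
          rw [not_lt] at hh
          exact hcp ((H _ hm1 hm2).2 hh)
        rw [ih l (PySem.Int.floordiv (l + r) 2 - 1) ans
          (by omega) (fun x hx1 hx2 => H x hx1 (by omega))]
        split_ifs <;> omega
    · rw [if_neg hlr, if_neg (by omega : ¬ (l ≤ r ∧ l ≤ W))]

-- main equivalence
theorem solution_eq_alt (stones : List Int) (k : Int) (hne : stones ≠ []) (hk1 : 1 ≤ k) :
    solution stones k = solution_alt stones k := by
  cases hmax : PySem.List.max? stones (fun y => y) with
  | none => exact absurd ((PySem.List.max?_eq_none_iff _ _).1 hmax) hne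
  | some Rm =>
  cases hmin : PySem.List.min? stones (fun y => y) with
  | none => exact absurd ((PySem.List.min?_eq_none_iff _ _).1 hmin) hne
  | some Lm =>
  have hsol : solution stones k = solveLoop stones k (Rm + 1 - Lm).toNat 0 Lm Rm := by
    unfold solution
    rw [hmax, hmin]
  have hRmax : ∀ y ∈ stones, y ≤ Rm := by
    intro y hy; simpa using PySem.List.max?_isMax hmax y hy
  have hLmin : ∀ y ∈ stones, Lm ≤ y := by
    intro y hy; simpa using PySem.List.min?_isMin hmin y hy
  by_cases hkn : k ≤ (stones.length : Int)
  · obtain ⟨W, hBeq, hWmem, hWin, p, m, q, hsp, hlen, hub⟩ := alt_char stones k hk1 hkn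
    have H : ∀ x, Lm ≤ x → x ≤ Rm → (canPass x stones k = true ↔ x ≤ W) := by
      intro x _ _
      constructor
      · intro hcp
        by_contra hxW
        rw [not_le] at hxW
        have hfalse := canPass_false x k stones p m q hsp hlen hk1
          (fun s hs => lt_of_le_of_lt (hub s hs) hxW)
        rw [hfalse] at hcp
        exact Bool.noConfusion hcp
      · intro hxW
        refine canPass_true x k stones (by omega) ?_
        intro p' m' q' hsp' hlen'
        obtain ⟨s, hs, hWs⟩ := hWin p' m' q' hsp' hlen'
        exact ⟨s, hs, le_trans hxW hWs⟩
    have hLW : Lm ≤ W := hLmin W hWmem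
    have hWR : W ≤ Rm := hRmax W hWmem
    rw [hsol, solveLoop_char stones k W (Rm + 1 - Lm).toNat Lm Rm 0 le_rfl H]
    rw [hBeq]
    rw [if_pos ⟨by omega, hLW⟩]
    omega
  · -- k > len(stones): no window of length k exists, canPass is always true
    have H : ∀ x, Lm ≤ x → x ≤ Rm → (canPass x stones k = true ↔ x ≤ Rm) := by
      intro x _ hx2
      refine ⟨fun _ => hx2, fun _ => ?_⟩
      refine canPass_true x k stones (by omega) ?_
      intro p m q hsp hlen
      exfalso
      have hlenall := congrArg List.length hsp
      simp only [List.length_append] at hlenall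
      omega
    obtain ⟨y, hy⟩ := List.exists_mem_of_ne_nil stones hne
    have hLR : Lm ≤ Rm := le_trans (hLmin y hy) (hRmax y hy)
    rw [hsol, solveLoop_char stones k Rm (Rm + 1 - Lm).toNat Lm Rm 0 le_rfl H]
    rw [if_pos ⟨hLR, hLR⟩]
    unfold solution_alt
    rw [if_pos (by omega : k > (stones.length : Int)), hmax]
    simp only [Option.getD_some]
    omega

-- ===== VERDICT (by name: the statement is the Claim_ definition above) =====
theorem solution_spec : Claim_equal_solution := by
  intro stones k _ hpre
  unfold Spec_solution
  exact solution_eq_alt stones k hpre.1 hpre.2
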